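-- pv_equiv track=rewrite | github.com/AhmedShaaban111/Prescription-API | drug_pipeline.py | _closest_dose_score
-- ===== SOURCE A (Python) =====
-- def _closest_dose_score(nums_in_name: list[str], dose_num: str) -> int:
--     """Score a product by how close its strength is to the prescribed dose."""
--     if not dose_num or not nums_in_name:
--         return 0
--     target = int(dose_num)
--     valid  = [int(n) for n in nums_in_name if n.isdigit() and 0 < int(n) < 10000]
--     if not valid:
--         return 0
--     diff = min(abs(n - target) for n in valid)
--     if diff == 0:   return +15
--     if diff <= 5:   return +10
--     if diff <= 15:  return +6
--     if diff <= 50:  return +2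
--     return -5
-- ===== SOURCE B (Python) =====
-- def _score(d: int) -> int:
--     if d == 0:  return +15
--     if d <= 5:  return +10
--     if d <= 15: return +6
--     if d <= 50: return +2
--     return -5
--
-- def _closest_dose_score(nums_in_name: list[str], dose_num: str) -> int:
--     """Score each valid candidate individually and keep the best score."""
--     if not dose_num or not nums_in_name:
--         return 0
--     target = int(dose_num)
--     best = None
--     for n in nums_in_name:
--         if n.isdigit():
--             v = int(n)
--             if 0 < v < 10000:
--                 s = _score(abs(v - target))
--                 if best is None or s > best:
--                     best = s
--     return best if best is not None else 0
-- ===== Notes on version B (the rewrite author's own statement) =====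
-- stated objective: alternative
-- what changed: Instead of building the list of valid strengths, taking the minimum absolute difference and mapping that single diff through the threshold ladder, B scores each valid candidate individually in one pass and keeps a running best score (reduce by maximum over scores rather than minimum over diffs), with no intermediate lists.
import Mathlib
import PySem

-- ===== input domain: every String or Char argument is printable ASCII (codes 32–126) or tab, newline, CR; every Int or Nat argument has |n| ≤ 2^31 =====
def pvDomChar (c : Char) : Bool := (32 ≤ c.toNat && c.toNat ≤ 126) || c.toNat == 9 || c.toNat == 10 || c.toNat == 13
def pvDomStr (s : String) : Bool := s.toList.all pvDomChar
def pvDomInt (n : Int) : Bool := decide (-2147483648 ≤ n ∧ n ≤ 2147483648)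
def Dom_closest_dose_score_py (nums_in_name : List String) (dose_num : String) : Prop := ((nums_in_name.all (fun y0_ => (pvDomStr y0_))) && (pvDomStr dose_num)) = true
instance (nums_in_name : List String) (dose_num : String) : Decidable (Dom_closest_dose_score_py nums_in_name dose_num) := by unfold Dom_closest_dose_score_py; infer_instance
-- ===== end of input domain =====

-- B replaces "min absolute diff, then ladder" by "score each valid candidate, keep the running best score"; same cost, different reduction.


-- ===== PORT A =====
-- int(n) under 'n.isdigit()' always succeeds, so '(… ).getD 0' is exact there.
def closest_dose_score_py (nums_in_name : List String) (dose_num : String) : Int :=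
  if dose_num = "" ∨ nums_in_name = [] then 0
  else
    let target := (PySem.Int.ofStr? dose_num).getD 0   -- Pre_ guarantees int(dose_num) succeeds
    let valid := (nums_in_name.filter (fun n =>
        PySem.Str.strIsdigit n && decide (0 < (PySem.Int.ofStr? n).getD 0)
          && decide ((PySem.Int.ofStr? n).getD 0 < 10000))).map (fun n => (PySem.Int.ofStr? n).getD 0)
    if valid = [] then 0
    else
      match PySem.List.min? (valid.map (fun n => |n - target|)) (fun x => x) with
      | none => 0    -- unreachable: valid ≠ []
      | some diff =>
        if diff = 0 then 15
        else if diff ≤ 5 then 10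
        else if diff ≤ 15 then 6
        else if diff ≤ 50 then 2
        else -5

-- ===== PORT B =====
def pvScore (d : Int) : Int :=
  if d = 0 then 15
  else if d ≤ 5 then 10
  else if d ≤ 15 then 6
  else if d ≤ 50 then 2
  else -5

-- the 'for n in nums_in_name' loop of Source B, carrying the running best score
def pvBestGo (target : Int) (best : Option Int) : List String → Option Int
  | [] => best
  | n :: rest =>
    if PySem.Str.strIsdigit n then
      let v := (PySem.Int.ofStr? n).getD 0
      if 0 < v ∧ v < 10000 then
        let s := pvScore (|v - target|)
        pvBestGo target (some (match best with
          | none => s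
          | some b => if s > b then s else b)) rest
      else pvBestGo target best rest
    else pvBestGo target best rest

def closest_dose_score_py_alt (nums_in_name : List String) (dose_num : String) : Int :=
  if dose_num = "" ∨ nums_in_name = [] then 0
  else
    let target := (PySem.Int.ofStr? dose_num).getD 0
    match pvBestGo target none nums_in_name with
    | none => 0
    | some b => b

-- ===== PRECONDITION & SPEC =====
-- Pre_ excludes exactly the inputs on which A raises ValueError: both guards nonempty but int(dose_num) fails.
def Pre_closest_dose_score_py (nums_in_name : List String) (dose_num : String) : Prop :=
  (dose_num ≠ "" ∧ nums_in_name ≠ []) → (PySem.Int.ofStr? dose_num).isSome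

instance (nums_in_name : List String) (dose_num : String) : Decidable (Pre_closest_dose_score_py nums_in_name dose_num) := by unfold Pre_closest_dose_score_py; infer_instance

def pvWitness_closest_dose_score_py : List String × String := (["5", "abc", "120"], "7")

def Spec_closest_dose_score_py (nums_in_name : List String) (dose_num : String) (out : Int) : Prop := out = closest_dose_score_py_alt nums_in_name dose_num
instance (nums_in_name : List String) (dose_num : String) (out : Int) : Decidable (Spec_closest_dose_score_py nums_in_name dose_num out) := by unfold Spec_closest_dose_score_py; infer_instance

-- ===== CLAIM (what is proved, stated in full; the proofs are below) =====
def Claim_equal_closest_dose_score_py : Prop := ∀ (nums_in_name : List String) (dose_num : String), Dom_closest_dose_score_py nums_in_name dose_num → Pre_closest_dose_score_py nums_in_name dose_num → Spec_closest_dose_score_py nums_in_name dose_num (closest_dose_score_py nums_in_name dose_num)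

-- ===== LEMMAS AND PROOFS =====

-- pvScore is antitone on nonnegative diffs
theorem pvScore_antitone {a b : Int} (ha : 0 ≤ a) (hab : a ≤ b) : pvScore b ≤ pvScore a := by
  unfold pvScore; split_ifs <;> omega

theorem pvScore_min (x d : Int) (hx : 0 ≤ x) (hd : 0 ≤ d) :
    (if pvScore d > pvScore x then pvScore d else pvScore x) = pvScore (min x d) := by
  rcases le_total x d with h | h
  · have := pvScore_antitone hx h
    simp [min_eq_left h]; omega
  · have := pvScore_antitone hd h
    rcases lt_or_eq_of_le this with h' | h'
    · simp [min_eq_right h, h']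
    · simp [min_eq_right h, h']

-- B's loop as a fold over the diffs of the valid candidates
def pvDiffs (target : Int) (ns : List String) : List Int :=
  ((ns.filter (fun n =>
      PySem.Str.strIsdigit n && decide (0 < (PySem.Int.ofStr? n).getD 0)
        && decide ((PySem.Int.ofStr? n).getD 0 < 10000))).map (fun n => (PySem.Int.ofStr? n).getD 0)).map
    (fun v => |v - target|)

theorem pvBestGo_eq_foldl (target : Int) (ns : List String) (best : Option Int) :
    pvBestGo target best ns =
      (pvDiffs target ns).foldl (fun acc d => some (match acc with
        | none => pvScore d
        | some b => if pvScore d > b then pvScore d else b)) best := by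
  induction ns generalizing best with
  | nil => simp [pvBestGo, pvDiffs]
  | cons n rest ih =>
    by_cases h1 : PySem.Str.strIsdigit n
    · have h1c : PySem.Chars.strIsdigit n.toList = true := by simpa using h1
      by_cases h2 : 0 < (PySem.Int.ofStr? n).getD 0 ∧ (PySem.Int.ofStr? n).getD 0 < 10000
      · have hstep : pvDiffs target (n :: rest)
            = |(PySem.Int.ofStr? n).getD 0 - target| :: pvDiffs target rest := by
          simp [pvDiffs, h1c, h2.1, h2.2]
        rw [hstep]
        simp only [pvBestGo, h1, if_true, if_pos h2, List.foldl_cons]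
        exact ih _
      · have hstep : pvDiffs target (n :: rest) = pvDiffs target rest := by
          rcases Decidable.not_and_iff_or_not.mp h2 with h | h <;>
            simp [pvDiffs, h]
        rw [hstep]
        simp only [pvBestGo, h1, if_true, if_neg h2]
        exact ih best
    · have h1c : PySem.Chars.strIsdigit n.toList = false := by
        simpa using Bool.eq_false_iff.mpr h1
      have hstep : pvDiffs target (n :: rest) = pvDiffs target rest := by
        simp [pvDiffs, h1c]
      rw [hstep]
      simp only [pvBestGo, if_neg h1]
      exact ih best

-- max-of-scores over a diff list = score of min diff (all diffs nonneg)
theorem foldl_score_eq_score_foldl_min (t : List Int) (x : Int) (hx : 0 ≤ x)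
    (ht : ∀ d ∈ t, 0 ≤ d) :
    t.foldl (fun b d => if pvScore d > b then pvScore d else b) (pvScore x)
      = pvScore (t.foldl min x) := by
  induction t generalizing x with
  | nil => rfl
  | cons d t ih =>
    have hd : 0 ≤ d := ht d (by simp)
    simp only [List.foldl_cons]
    rw [pvScore_min x d hx hd, ih (min x d) (le_min hx hd) (fun e he => ht e (by simp [he]))]

theorem pvDiffs_nonneg (target : Int) (ns : List String) : ∀ d ∈ pvDiffs target ns, 0 ≤ d := by
  intro d hd
  simp only [pvDiffs, List.mem_map] at hd
  obtain ⟨v, _, rfl⟩ := hd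
  exact abs_nonneg _

theorem foldl_some_shape (t : List Int) (b : Int) :
    t.foldl (fun acc e => some (match acc with
        | none => pvScore e
        | some b => if pvScore e > b then pvScore e else b)) (some b)
      = some (t.foldl (fun b e => if pvScore e > b then pvScore e else b) b) := by
  induction t generalizing b with
  | nil => rfl
  | cons e t ih => simp only [List.foldl_cons]; exact ih _

theorem foldl_none_cons (d : Int) (ds : List Int) :
    (d :: ds).foldl (fun acc e => some (match acc with
        | none => pvScore e
        | some b => if pvScore e > b then pvScore e else b)) none
      = some (ds.foldl (fun b e => if pvScore e > b then pvScore e else b) (pvScore d)) := by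
  rw [List.foldl_cons]
  exact foldl_some_shape ds (pvScore d)

-- ===== VERDICT (by name: the statement is the Claim_ definition above) =====
theorem closest_dose_score_py_spec : Claim_equal_closest_dose_score_py := by
  intro nums dose _ hpre
  unfold Spec_closest_dose_score_py closest_dose_score_py closest_dose_score_py_alt
  by_cases hguard : dose = "" ∨ nums = []
  · simp [hguard]
  · simp only [if_neg hguard]
    rw [pvBestGo_eq_foldl]
    set target := (PySem.Int.ofStr? dose).getD 0 with htarget
    rcases hvalid : pvDiffs target nums with _ | ⟨d, ds⟩
    · have hv : ((nums.filter (fun n =>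
          PySem.Str.strIsdigit n && decide (0 < (PySem.Int.ofStr? n).getD 0)
            && decide ((PySem.Int.ofStr? n).getD 0 < 10000))).map (fun n => (PySem.Int.ofStr? n).getD 0)) = [] :=
        List.map_eq_nil_iff.mp hvalid
      rw [if_pos hv]
      rfl
    · have hmapeq : ((nums.filter (fun n =>
          PySem.Str.strIsdigit n && decide (0 < (PySem.Int.ofStr? n).getD 0)
            && decide ((PySem.Int.ofStr? n).getD 0 < 10000))).map (fun n => (PySem.Int.ofStr? n).getD 0)).map
          (fun n => |n - target|) = d :: ds := hvalid
      have hne : ((nums.filter (fun n =>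
          PySem.Str.strIsdigit n && decide (0 < (PySem.Int.ofStr? n).getD 0)
            && decide ((PySem.Int.ofStr? n).getD 0 < 10000))).map (fun n => (PySem.Int.ofStr? n).getD 0)) ≠ [] := by
        intro h
        rw [h] at hmapeq
        simp at hmapeq
      have hd : 0 ≤ d := pvDiffs_nonneg target nums d (by rw [hvalid]; simp)
      have hds : ∀ e ∈ ds, 0 ≤ e := fun e he => pvDiffs_nonneg target nums e (by rw [hvalid]; simp [he])
      rw [if_neg hne, hmapeq, PySem.List.min?_id_cons, foldl_none_cons,
        foldl_score_eq_score_foldl_min ds d hd hds]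
      rfl
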